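-- pv_equiv track=rewrite | github.com/khiulee/sparta_algorithm | week_5/03_get_correct_parentheses.py | get_correct_parentheses
-- ===== SOURCE A (Python) =====
-- def get_correct_parentheses(balanced_parentheses_string):
--     if balanced_parentheses_string == '':
--         return ''
--     point_to_split = split_point(balanced_parentheses_string)
--     u = balanced_parentheses_string[:point_to_split]
--     v = balanced_parentheses_string[point_to_split:]
--     if is_correct(u):
--         return u + get_correct_parentheses(v)
--     else:
--         return correct(u) + get_correct_parentheses(v)
--     return
--
-- def split_point(string):
--     level = 0
--     for i in range(len(string)):
--         if string[i] == '(':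
--             level += 1
--         else:
--             level -= 1
--         if level == 0:
--             return i + 1
--     return len(string)
--
-- def is_correct(string):
--     level = 0
--     for i in range(len(string)):
--         if string[i] == '(':
--             level += 1
--         else:
--             level -= 1
--
--         if level < 0:
--             return False
--     return True
--
-- def correct(string):
--     temp = string[1:-1]
--     return '(' + reverse(temp) + ')'
--
-- def reverse(string):
--     result = ''
--     for i in string:
--         if i == '(':
--             result += ')'
--         else:
--             result += '('
--     return result
-- ===== SOURCE B (Python) =====
-- def _emit(block):
--     if block[0] == '(':
--         return ''.join(block)
--     return '(' + ''.join(')' if ch == '(' else '(' for ch in block[1:-1]) + ')'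
--
-- def get_correct_parentheses(balanced_parentheses_string):
--     out = []
--     block = []
--     level = 0
--     for c in balanced_parentheses_string:
--         block.append(c)
--         level += 1 if c == '(' else -1
--         if level == 0:
--             out.append(_emit(block))
--             block = []
--     if block:
--         out.append(_emit(block))
--     return ''.join(out)
-- ===== Notes on version B (the rewrite author's own statement) =====
-- stated objective: alternative
-- what changed: Replaced A's recursive split-slice-recurse scheme (find the split point, slice off the block, recurse on the rest) by a single left-to-right fold that tracks the nesting level, cuts a block each time the level returns to 0, corrects each block by its first character, and joins the corrected blocks at the end.
import Mathlib
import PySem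

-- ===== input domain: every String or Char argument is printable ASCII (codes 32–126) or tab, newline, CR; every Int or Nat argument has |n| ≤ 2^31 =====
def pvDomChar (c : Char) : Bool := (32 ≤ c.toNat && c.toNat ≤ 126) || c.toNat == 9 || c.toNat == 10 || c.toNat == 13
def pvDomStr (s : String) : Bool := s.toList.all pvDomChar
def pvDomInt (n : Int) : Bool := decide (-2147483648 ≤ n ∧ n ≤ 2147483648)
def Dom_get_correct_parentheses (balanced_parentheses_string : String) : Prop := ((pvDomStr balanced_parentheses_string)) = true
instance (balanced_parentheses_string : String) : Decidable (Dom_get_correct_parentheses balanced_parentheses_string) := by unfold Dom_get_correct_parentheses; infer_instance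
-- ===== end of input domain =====

-- B replaces A's recursive split/slice/recurse scheme by a single left-to-right
-- pass that tracks the nesting level and emits each corrected block as it closes.

-- ===== PORT A =====

-- the level update both loops perform: level += 1 if c == '(' else -1
def pvUpd (level : Int) (c : Char) : Int := if c = '(' then level + 1 else level - 1

-- split_point's loop: level and index threaded through the characters
def pvSplitAux : List Char → Int → Nat → Nat
  | [], _, i => i
  | c :: rest, level, i =>
      if pvUpd level c = 0 then i + 1 else pvSplitAux rest (pvUpd level c) (i + 1)

def pvSplitPoint (l : List Char) : Nat := pvSplitAux l 0 0

-- is_correct's loop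
def pvIsCorrectAux : List Char → Int → Bool
  | [], _ => true
  | c :: rest, level =>
      if pvUpd level c < 0 then false else pvIsCorrectAux rest (pvUpd level c)

def pvIsCorrect (l : List Char) : Bool := pvIsCorrectAux l 0

-- reverse's loop: result += flipped char (left fold on a string accumulator)
def pvReverseA (l : List Char) : List Char :=
  l.foldl (fun result c => result ++ [if c = '(' then ')' else '(']) []

-- correct: '(' + reverse(string[1:-1]) + ')'
def pvCorrectA (l : List Char) : List Char :=
  '(' :: pvReverseA (PySem.List.slice l (some 1) (some (-1))) ++ [')']

-- needed only for pvGoA's termination (split_point ≥ 1 on a nonempty string)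
theorem pvSplitAux_ge (l : List Char) (level : Int) (i : Nat) : i ≤ pvSplitAux l level i := by
  induction l generalizing level i with
  | nil => simp [pvSplitAux]
  | cons c rest ih =>
      simp only [pvSplitAux]
      split
      · omega
      · exact Nat.le_trans (Nat.le_succ i) (ih _ (i + 1))

theorem pvSplitPoint_pos (c : Char) (rest : List Char) : 1 ≤ pvSplitPoint (c :: rest) := by
  simp only [pvSplitPoint, pvSplitAux]
  split
  · omega
  · exact pvSplitAux_ge rest _ 1

-- A's recursion, on the character list (u and v written out at each use)
def pvGoA : List Char → List Char
  | [] => []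
  | c :: rest =>
      if pvIsCorrect ((c :: rest).take (pvSplitPoint (c :: rest))) then
        (c :: rest).take (pvSplitPoint (c :: rest)) ++ pvGoA ((c :: rest).drop (pvSplitPoint (c :: rest)))
      else
        pvCorrectA ((c :: rest).take (pvSplitPoint (c :: rest))) ++ pvGoA ((c :: rest).drop (pvSplitPoint (c :: rest)))
termination_by l => l.length
decreasing_by
  all_goals
    have := pvSplitPoint_pos c rest
    simp only [List.length_drop, List.length_cons]
    omega

def get_correct_parentheses (balanced_parentheses_string : String) : String :=
  String.ofList (pvGoA balanced_parentheses_string.toList)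

-- ===== PORT B =====

-- _emit: keep a block opening with '(', otherwise wrap the flipped interior in '(' ')'
def pvEmit (b : List Char) : List Char :=
  if b.head? = some '(' then b
  else '(' :: ((PySem.List.slice b (some 1) (some (-1))).map
        (fun ch => if ch = '(' then ')' else '(')) ++ [')']

-- one step of B's single pass: extend the block, update the level, cut when it hits 0
def pvStepB (st : List (List Char) × List Char × Int) (c : Char) :
    List (List Char) × List Char × Int :=
  if pvUpd st.2.2 c = 0 then (st.1 ++ [pvEmit (st.2.1 ++ [c])], [], 0)
  else (st.1, st.2.1 ++ [c], pvUpd st.2.2 c)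

-- B's finish: append the unclosed block, if any, and join
def pvFin (st : List (List Char) × List Char × Int) : List Char :=
  (if st.2.1 = [] then st.1 else st.1 ++ [pvEmit st.2.1]).flatten

def get_correct_parentheses_alt (balanced_parentheses_string : String) : String :=
  String.ofList (pvFin (balanced_parentheses_string.toList.foldl pvStepB ([], [], 0)))

-- ===== PRECONDITION & SPEC =====
def Spec_get_correct_parentheses (balanced_parentheses_string : String) (out : String) : Prop := out = get_correct_parentheses_alt balanced_parentheses_string
instance (balanced_parentheses_string : String) (out : String) : Decidable (Spec_get_correct_parentheses balanced_parentheses_string out) := by unfold Spec_get_correct_parentheses; infer_instance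

-- ===== CLAIM (what is proved, stated in full; the proofs are below) =====
def Claim_equal_get_correct_parentheses : Prop := ∀ (balanced_parentheses_string : String), Dom_get_correct_parentheses balanced_parentheses_string → Spec_get_correct_parentheses balanced_parentheses_string (get_correct_parentheses balanced_parentheses_string)

-- ===== LEMMAS AND PROOFS =====

-- running nesting level of a list of characters
def pvLvl (l : List Char) : Int := l.foldl pvUpd 0

theorem pvUpd_zero (lv : Int) (c : Char) : pvUpd lv c = lv + pvUpd 0 c := by
  simp only [pvUpd]; split <;> ring

theorem pvLvl_shift (l : List Char) (lv : Int) : l.foldl pvUpd lv = lv + pvLvl l := by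
  induction l generalizing lv with
  | nil => simp [pvLvl]
  | cons c rest ih =>
      simp only [pvLvl, List.foldl_cons]
      rw [ih, ih (pvUpd 0 c), pvUpd_zero]
      ring

theorem pvLvl_cons (c : Char) (t : List Char) : pvLvl (c :: t) = pvUpd 0 c + pvLvl t := by
  simp only [pvLvl, List.foldl_cons]
  exact pvLvl_shift t (pvUpd 0 c)

theorem pvLvl_singleton (c : Char) : pvLvl [c] = pvUpd 0 c := by
  simp [pvLvl]

theorem pvLvl_snoc (b : List Char) (c : Char) : pvLvl (b ++ [c]) = pvUpd (pvLvl b) c := by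
  simp [pvLvl, List.foldl_append]

-- "open block": every nonempty prefix has nonzero level
def pvOpen (b : List Char) : Prop :=
  ∀ k, 1 ≤ k → k ≤ b.length → pvLvl (b.take k) ≠ 0

theorem pvOpen_nil : pvOpen [] := by intro k h1 h2; simp at h2; omega

theorem pvOpen_snoc (b : List Char) (c : Char) (hb : pvOpen b)
    (hc : pvLvl (b ++ [c]) ≠ 0) : pvOpen (b ++ [c]) := by
  intro k h1 h2
  rcases Nat.lt_or_ge k (b.length + 1) with h | h
  · have hk : k ≤ b.length := by omega
    rw [List.take_append_of_le_length hk]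
    exact hb k h1 hk
  · have hk : b.length + 1 ≤ k := h
    rw [List.take_of_length_le (by simp; omega)]
    exact hc

-- split_point counts straight to the end while the running level stays nonzero
theorem pvSplitAux_full (l : List Char) (lv : Int) (i : Nat)
    (h : ∀ k, 1 ≤ k → k ≤ l.length → lv + pvLvl (l.take k) ≠ 0) :
    pvSplitAux l lv i = i + l.length := by
  induction l generalizing lv i with
  | nil => simp [pvSplitAux]
  | cons c rest ih =>
      simp only [pvSplitAux]
      have hA := pvUpd_zero lv c
      have h1 : lv + pvLvl [c] ≠ 0 := by
        simpa using h 1 (by omega) (by simp)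
      rw [pvLvl_singleton] at h1
      rw [if_neg (by omega)]
      rw [ih (pvUpd lv c) (i + 1) ?_]
      · simp only [List.length_cons]; omega
      · intro k hk1 hk2
        have := h (k + 1) (by omega) (by simp; omega)
        rw [List.take_succ_cons, pvLvl_cons] at this
        omega

-- split_point finds exactly the end of an open-then-closing block, through any suffix
theorem pvSplitAux_close (u rest : List Char) (lv : Int) (i : Nat) (hu : u ≠ [])
    (hop : ∀ k, 1 ≤ k → k < u.length → lv + pvLvl (u.take k) ≠ 0)
    (hz : lv + pvLvl u = 0) :
    pvSplitAux (u ++ rest) lv i = i + u.length := by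
  induction u generalizing lv i with
  | nil => exact absurd rfl hu
  | cons c u2 ih =>
      simp only [List.cons_append, pvSplitAux]
      have hA := pvUpd_zero lv c
      cases u2 with
      | nil =>
          have hz' : pvUpd lv c = 0 := by
            rw [pvLvl_singleton] at hz; omega
          rw [if_pos hz']
          simp
      | cons d u3 =>
          have h1 : lv + pvLvl [c] ≠ 0 := by
            simpa using hop 1 (by omega) (by simp)
          rw [pvLvl_singleton] at h1
          rw [if_neg (by omega)]
          rw [ih (pvUpd lv c) (i + 1) (by simp) ?_ ?_]
          · simp only [List.length_cons]; omega
          · intro k hk1 hk2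
            have := hop (k + 1) (by omega) (by simp at hk2 ⊢; omega)
            rw [List.take_succ_cons, pvLvl_cons] at this
            omega
          · rw [pvLvl_cons] at hz
            omega

-- pvUpd moves by exactly one
theorem pvUpd_zero_cases (c : Char) : pvUpd 0 c = 1 ∨ pvUpd 0 c = -1 := by
  simp only [pvUpd]
  split <;> norm_num

-- is_correct stays true while the level is positive and never crosses zero
theorem pvIsCorrectAux_pos (t : List Char) (lv : Int) (hlv : 0 < lv)
    (h : ∀ k, 1 ≤ k → k < t.length → lv + pvLvl (t.take k) ≠ 0) :
    pvIsCorrectAux t lv = true := by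
  induction t generalizing lv with
  | nil => simp [pvIsCorrectAux]
  | cons c rest ih =>
      simp only [pvIsCorrectAux]
      have hA := pvUpd_zero lv c
      have hcase := pvUpd_zero_cases c
      rw [if_neg (by omega)]
      cases rest with
      | nil => simp [pvIsCorrectAux]
      | cons d r3 =>
          have h1 : lv + pvLvl [c] ≠ 0 := by
            simpa using h 1 (by omega) (by simp)
          rw [pvLvl_singleton] at h1
          refine ih _ (by omega) ?_
          intro k hk1 hk2
          have := h (k + 1) (by omega) (by simp at hk2 ⊢; omega)
          rw [List.take_succ_cons, pvLvl_cons] at this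
          omega

-- A's per-block output
def pvEmitA (u : List Char) : List Char :=
  if pvIsCorrect u then u else pvCorrectA u

-- result += flip(c) over a string is just map flip
theorem pvReverseA_eq_map (l : List Char) :
    pvReverseA l = l.map (fun ch => if ch = '(' then ')' else '(') := by
  suffices h : ∀ acc : List Char,
      l.foldl (fun result c => result ++ [if c = '(' then ')' else '(']) acc
        = acc ++ l.map (fun ch => if ch = '(' then ')' else '(') by
    simpa [pvReverseA] using h []
  induction l with
  | nil => simp
  | cons c rest ih => intro acc; simp [ih]

-- on a block whose interior levels never hit 0, A's emission equals B's _emit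
theorem pvEmitA_eq_emit (u : List Char) (hu : u ≠ [])
    (hop : ∀ k, 1 ≤ k → k < u.length → pvLvl (u.take k) ≠ 0) :
    pvEmitA u = pvEmit u := by
  obtain ⟨c, t, rfl⟩ := List.exists_cons_of_ne_nil hu
  by_cases hc : c = '('
  · subst hc
    have hone : pvUpd 0 '(' = 1 := by simp [pvUpd]
    have hcorrect : pvIsCorrect ('(' :: t) = true := by
      simp only [pvIsCorrect, pvIsCorrectAux, hone]
      rw [if_neg (by omega)]
      cases t with
      | nil => simp [pvIsCorrectAux]
      | cons d r3 =>
          apply pvIsCorrectAux_pos _ 1 (by omega)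
          intro k hk1 hk2
          have := hop (k + 1) (by omega) (by simp at hk2 ⊢; omega)
          rw [List.take_succ_cons, pvLvl_cons, hone] at this
          omega
    simp [pvEmitA, pvEmit, hcorrect]
  · have hmone : pvUpd 0 c = -1 := by simp [pvUpd, hc]
    have hincorrect : pvIsCorrect (c :: t) = false := by
      simp only [pvIsCorrect, pvIsCorrectAux, hmone]
      norm_num
    simp only [pvEmitA, hincorrect, Bool.false_eq_true, if_false]
    simp only [pvEmit, List.head?_cons]
    rw [if_neg (by simp [hc])]
    simp [pvCorrectA, pvReverseA_eq_map]

-- equation lemma for A's recursion on a nonempty list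
theorem pvGoA_eq (l : List Char) (hl : l ≠ []) :
    pvGoA l = pvEmitA (l.take (pvSplitPoint l)) ++ pvGoA (l.drop (pvSplitPoint l)) := by
  obtain ⟨c, t, rfl⟩ := List.exists_cons_of_ne_nil hl
  rw [pvGoA, pvEmitA]
  split <;> rfl

-- the main invariant: B's pass with pending open block b produces A's result on b ++ l
theorem pvKey (l : List Char) : ∀ (b : List Char) (out : List (List Char)) (lv : Int),
    lv = pvLvl b → pvOpen b →
    pvFin (l.foldl pvStepB (out, b, lv)) = out.flatten ++ pvGoA (b ++ l) := by
  induction l with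
  | nil =>
      intro b out lv hlv hb
      subst hlv
      simp only [List.foldl_nil, List.append_nil, pvFin]
      cases hbe : b with
      | nil => simp [pvGoA]
      | cons c t =>
          rw [← hbe]
          have hbne : b ≠ [] := by simp [hbe]
          rw [if_neg hbne, pvGoA_eq b hbne]
          have hp : pvSplitPoint b = b.length := by
            have := pvSplitAux_full b 0 0 (by intro k h1 h2; have := hb k h1 h2; omega)
            simpa [pvSplitPoint] using this
          rw [hp, List.take_length, List.drop_length]
          rw [pvEmitA_eq_emit b hbne (fun k h1 h2 => hb k h1 (by omega))]
          simp [pvGoA]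
  | cons c rest ih =>
      intro b out lv hlv hb
      subst hlv
      simp only [List.foldl_cons]
      have hstep : pvStepB (out, b, pvLvl b) c =
          (if pvLvl (b ++ [c]) = 0 then (out ++ [pvEmit (b ++ [c])], [], 0)
           else (out, b ++ [c], pvLvl (b ++ [c]))) := by
        simp only [pvStepB, ← pvLvl_snoc]
      rw [hstep]
      by_cases hz : pvLvl (b ++ [c]) = 0
      · rw [if_pos hz]
        rw [ih [] (out ++ [pvEmit (b ++ [c])]) 0 rfl pvOpen_nil]
        have hbne : b ++ [c] ≠ [] := by simp
        have hlist : b ++ c :: rest = (b ++ [c]) ++ rest := by simp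
        rw [hlist, pvGoA_eq ((b ++ [c]) ++ rest) (by simp)]
        have hp : pvSplitPoint ((b ++ [c]) ++ rest) = (b ++ [c]).length := by
          have := pvSplitAux_close (b ++ [c]) rest 0 0 hbne
            (by intro k hk1 hk2
                have hk : k ≤ b.length := by simp at hk2; omega
                rw [List.take_append_of_le_length hk]
                have := hb k hk1 hk
                omega)
            (by omega)
          simpa [pvSplitPoint] using this
        rw [hp, List.take_left, List.drop_left]
        rw [pvEmitA_eq_emit (b ++ [c]) hbne ?_]
        · simp
        · intro k h1 h2
          have hk : k ≤ b.length := by simp at h2; omega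
          rw [List.take_append_of_le_length hk]
          exact hb k h1 hk
      · rw [if_neg hz]
        rw [ih (b ++ [c]) out (pvLvl (b ++ [c])) rfl (pvOpen_snoc b c hb hz)]
        simp

-- ===== VERDICT (by name: the statement is the Claim_ definition above) =====
theorem get_correct_parentheses_spec : Claim_equal_get_correct_parentheses := by
  intro s _
  unfold Spec_get_correct_parentheses get_correct_parentheses get_correct_parentheses_alt
  have h := pvKey s.toList [] [] 0 rfl pvOpen_nil
  simp only [List.nil_append] at h
  rw [h]
  simp
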